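-- pv_equiv track=rewrite | github.com/StefanVlad27/formacion-python | tema5/apuntes_tema_5.py | reducir_lista
-- ===== SOURCE A (Python) =====
-- def reducir_lista(lista):
--     duplicados = []
--
--     for n in lista:
--         if n not in duplicados:
--             duplicados.append(n)
--         else:
--             pass
--     duplicados.sort()
--     duplicados.pop()
--
--     return duplicados
-- ===== SOURCE B (Python) =====
-- def reducir_lista(lista):
--     res = []
--     for x in sorted(lista):
--         if not res or res[-1] != x:
--             res.append(x)
--     res.pop()
--     return res
-- ===== Notes on version B (the rewrite author's own statement) =====
-- stated objective: faster
-- what changed: sorts first and deduplicates by comparing each element with the last kept one in a single pass, instead of a repeated O(k) membership scan into the accumulated list before sorting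
import Mathlib
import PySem

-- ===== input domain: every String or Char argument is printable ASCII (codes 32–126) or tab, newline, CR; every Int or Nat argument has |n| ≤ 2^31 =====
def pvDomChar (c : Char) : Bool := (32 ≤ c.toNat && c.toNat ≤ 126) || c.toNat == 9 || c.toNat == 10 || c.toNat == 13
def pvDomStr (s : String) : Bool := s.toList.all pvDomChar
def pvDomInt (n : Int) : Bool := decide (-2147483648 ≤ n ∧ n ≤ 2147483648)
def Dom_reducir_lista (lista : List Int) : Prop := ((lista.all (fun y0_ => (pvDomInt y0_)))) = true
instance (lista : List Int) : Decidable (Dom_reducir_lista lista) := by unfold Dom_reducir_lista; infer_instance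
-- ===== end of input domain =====

-- B sorts first and deduplicates adjacently in one pass (O(n log n)) instead of A's
-- repeated membership scan before sorting; return values agree on all nonempty lists.

-- ===== PORT A =====
def reducir_lista (lista : List Int) : List Int :=
  -- duplicados = []; for n in lista: if n not in duplicados: duplicados.append(n)
  let duplicados := lista.foldl (fun acc n => if n ∈ acc then acc else acc ++ [n]) []
  -- duplicados.sort()
  let duplicados := PySem.List.sorted duplicados (fun x => x) false
  -- duplicados.pop(): removes the last element; IndexError on [] (excluded by Pre_)
  duplicados.dropLast

-- ===== PORT B =====
def reducir_lista_alt (lista : List Int) : List Int :=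
  -- res = []; for x in sorted(lista): if not res or res[-1] != x: res.append(x)
  let res := (PySem.List.sorted lista (fun x => x) false).foldl
    (fun acc x => if acc = [] ∨ acc.getLast? ≠ some x then acc ++ [x] else acc) []
  -- res.pop(): removes the last element; IndexError on [] (excluded by Pre_)
  res.dropLast

-- ===== PRECONDITION & SPEC =====
-- Pre_ excludes the empty list, on which both A and B raise IndexError at the final .pop().
def Pre_reducir_lista (lista : List Int) : Prop := lista ≠ []
instance (lista : List Int) : Decidable (Pre_reducir_lista lista) := by unfold Pre_reducir_lista; infer_instance
def pvWitness_reducir_lista : List Int := ([3, 1, 3, 2])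

def Spec_reducir_lista (lista : List Int) (out : List Int) : Prop := out = reducir_lista_alt lista
instance (lista : List Int) (out : List Int) : Decidable (Spec_reducir_lista lista out) := by unfold Spec_reducir_lista; infer_instance

-- ===== CLAIM (what is proved, stated in full; the proofs are below) =====
def Claim_equal_reducir_lista : Prop := ∀ (lista : List Int), Dom_reducir_lista lista → Pre_reducir_lista lista → Spec_reducir_lista lista (reducir_lista lista)

-- ===== LEMMAS AND PROOFS =====

-- A's dedup loop: membership and nodup
theorem aDedup_mem (l : List Int) (acc : List Int) (y : Int) :
    y ∈ l.foldl (fun acc n => if n ∈ acc then acc else acc ++ [n]) acc ↔ y ∈ acc ∨ y ∈ l := by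
  induction l generalizing acc with
  | nil => simp [List.foldl]
  | cons v t ih =>
    simp only [List.foldl]
    by_cases hv : v ∈ acc
    · rw [if_pos hv, ih]
      simp only [List.mem_cons]
      constructor
      · rintro (h | h)
        · exact Or.inl h
        · exact Or.inr (Or.inr h)
      · rintro (h | h | h)
        · exact Or.inl h
        · exact Or.inl (h ▸ hv)
        · exact Or.inr h
    · rw [if_neg hv, ih]
      simp [List.mem_append, List.mem_cons]
      tauto

theorem aDedup_nodup (l : List Int) (acc : List Int) (hacc : acc.Nodup) :
    (l.foldl (fun acc n => if n ∈ acc then acc else acc ++ [n]) acc).Nodup := by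
  induction l generalizing acc with
  | nil => simpa [List.foldl]
  | cons v t ih =>
    simp only [List.foldl]
    by_cases hv : v ∈ acc
    · simpa [hv] using ih acc hacc
    · rw [if_neg hv]
      exact ih (acc ++ [v]) (by simp [List.nodup_append, hacc]; intro a ha h; exact hv (h ▸ ha))

-- in a strictly increasing list, every element is ≤ the last one
theorem le_getLast_of_pairwise_lt : ∀ (acc : List Int), acc.Pairwise (· < ·) →
    ∀ a ∈ acc, ∀ m, acc.getLast? = some m → a ≤ m := by
  intro acc
  induction acc with
  | nil => intro _ a ha; cases ha
  | cons x t ih =>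
    intro h a ha m hm
    cases t with
    | nil =>
      simp at ha hm
      omega
    | cons y u =>
      simp only [List.getLast?_cons_cons] at hm
      have hmem : m ∈ y :: u := List.mem_of_getLast? hm
      rcases List.mem_cons.mp ha with rfl | ha'
      · have : a < m := (List.pairwise_cons.mp h).1 m hmem
        omega
      · exact ih (List.pairwise_cons.mp h).2 a ha' m hm

-- B's adjacency-dedup loop on a sorted input: invariant
theorem bDedup_invariant (s : List Int) (acc : List Int)
    (hs : s.Pairwise (· ≤ ·)) (hacc : acc.Pairwise (· < ·))
    (hle : ∀ a ∈ acc, ∀ x ∈ s, a ≤ x) :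
    (s.foldl (fun acc x => if acc = [] ∨ acc.getLast? ≠ some x then acc ++ [x] else acc) acc).Pairwise (· < ·) ∧
    (∀ y, y ∈ s.foldl (fun acc x => if acc = [] ∨ acc.getLast? ≠ some x then acc ++ [x] else acc) acc ↔ y ∈ acc ∨ y ∈ s) := by
  induction s generalizing acc with
  | nil => simp [List.foldl, hacc]
  | cons v t ih =>
    have hs' : t.Pairwise (· ≤ ·) := (List.pairwise_cons.mp hs).2
    have hvt : ∀ y ∈ t, v ≤ y := (List.pairwise_cons.mp hs).1
    simp only [List.foldl]
    by_cases hc : acc = [] ∨ acc.getLast? ≠ some v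
    · rw [if_pos hc]
      have hacc' : (acc ++ [v]).Pairwise (· < ·) := by
        rw [List.pairwise_append]
        refine ⟨hacc, by simp, ?_⟩
        intro a ha b hb
        simp only [List.mem_singleton] at hb; subst hb
        have hav : a ≤ b := hle a ha b (by simp)
        obtain ⟨m, hm⟩ : ∃ m, acc.getLast? = some m := by
          cases acc with
          | nil => cases ha
          | cons z u => exact ⟨_, List.getLast?_eq_some_getLast (by simp)⟩
        have ham : a ≤ m := le_getLast_of_pairwise_lt acc hacc a ha m hm
        have hmv : m ≤ b := hle m (List.mem_of_getLast? hm) b (by simp)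
        have hne : m ≠ b := by
          rcases hc with h0 | hne
          · subst h0; cases ha
          · exact fun h => hne (h ▸ hm)
        omega
      have hle' : ∀ a ∈ acc ++ [v], ∀ y ∈ t, a ≤ y := by
        intro a ha y hy
        rcases List.mem_append.mp ha with ha | ha
        · exact le_trans (hle a ha v (by simp)) (hvt y hy)
        · simp only [List.mem_singleton] at ha; subst ha; exact hvt y hy
      obtain ⟨h1, h2⟩ := ih (acc ++ [v]) hs' hacc' hle'
      refine ⟨h1, ?_⟩
      intro y
      rw [h2]
      simp [List.mem_append, List.mem_cons]
      tauto
    · rw [if_neg hc]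
      push Not at hc
      obtain ⟨hne, hlast⟩ := hc
      have hvacc : v ∈ acc := List.mem_of_getLast? hlast
      have hle' : ∀ a ∈ acc, ∀ y ∈ t, a ≤ y := fun a ha y hy =>
        le_trans (hle a ha v (by simp)) (hvt y hy)
      obtain ⟨h1, h2⟩ := ih acc hs' hacc hle'
      refine ⟨h1, ?_⟩
      intro y
      rw [h2]
      simp only [List.mem_cons]
      constructor
      · rintro (h | h)
        · exact Or.inl h
        · exact Or.inr (Or.inr h)
      · rintro (h | h | h)
        · exact Or.inl h
        · exact Or.inl (h ▸ hvacc)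
        · exact Or.inr h

-- ===== VERDICT (by name: the statement is the Claim_ definition above) =====
theorem reducir_lista_spec : Claim_equal_reducir_lista := by
  intro lista _ _
  unfold Spec_reducir_lista reducir_lista reducir_lista_alt
  have hsorted : (PySem.List.sorted lista (fun x => x) false).Pairwise (· ≤ ·) := by
    simpa using PySem.List.sorted_pairwise lista (fun x => x)
  obtain ⟨hB1, hB2⟩ := bDedup_invariant (PySem.List.sorted lista (fun x => x) false) []
    hsorted (by simp) (by simp)
  set X := lista.foldl (fun acc n => if n ∈ acc then acc else acc ++ [n]) [] with hX
  set Y := (PySem.List.sorted lista (fun x => x) false).foldl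
    (fun acc x => if acc = [] ∨ acc.getLast? ≠ some x then acc ++ [x] else acc) [] with hY
  have hYX : Y.Perm X := by
    rw [List.perm_ext_iff_of_nodup (hB1.imp ne_of_lt) (aDedup_nodup lista [] List.nodup_nil)]
    intro a
    rw [hB2 a, aDedup_mem]
    simp [PySem.List.mem_sorted]
  have heq : PySem.List.sorted X (fun x => x) false = Y :=
    PySem.List.sorted_eq_of_perm_of_pairwise_lt X Y (fun x => x) hYX (by simpa using hB1)
  simp only [heq]
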